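-- pv_equiv track=rewrite | github.com/alexmelges/harnesskit | hk.py | _detect_indent_mapping
-- ===== SOURCE A (Python) =====
-- from typing import List, Optional, Tuple
--
-- def _get_line_indent(line: str) -> str:
--     """Return the leading whitespace of a line (excluding newline chars)."""
--     stripped = line.lstrip()
--     if not stripped:
--         # Whitespace-only line: return everything except trailing newline(s)
--         return line.rstrip('\n\r')
--     return line[:len(line) - len(stripped)]
--
-- def _detect_indent_mapping(old_text: str, matched_text: str) -> Optional[dict]:
--     """Detect systematic indentation differences between old_text and matched_text.
--
--     Returns a dict mapping old_indent -> new_indent, or None if no consistent mapping.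
--     """
--     old_lines = old_text.splitlines()
--     matched_lines = matched_text.splitlines()
--
--     if len(old_lines) != len(matched_lines):
--         return None
--
--     mapping = {}
--     for ol, ml in zip(old_lines, matched_lines):
--         oi = _get_line_indent(ol)
--         mi = _get_line_indent(ml)
--         if ol.strip() == ml.strip():  # Same content, different indent
--             if oi in mapping:
--                 if mapping[oi] != mi:
--                     return None  # Inconsistent
--             else:
--                 mapping[oi] = mi
--
--     return mapping if mapping else None
-- ===== SOURCE B (Python) =====
-- def _get_line_indent(line: str) -> str:
--     """Return the leading whitespace of a line (excluding newline chars)."""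
--     stripped = line.lstrip()
--     if not stripped:
--         return line.rstrip('\n\r')
--     return line[:len(line) - len(stripped)]
--
-- def _detect_indent_mapping(old_text: str, matched_text: str):
--     old_lines = old_text.splitlines()
--     matched_lines = matched_text.splitlines()
--     if len(old_lines) != len(matched_lines):
--         return None
--     # Collect the indent pairs of content-matching lines.
--     pairs = [(_get_line_indent(ol), _get_line_indent(ml))
--              for ol, ml in zip(old_lines, matched_lines)
--              if ol.strip() == ml.strip()]
--     # Brute-force pairwise consistency: no two pairs may share an old indent
--     # while disagreeing on the new indent (no dict, no early bookkeeping).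
--     for i in range(len(pairs)):
--         oi, mi = pairs[i]
--         for j in range(i + 1, len(pairs)):
--             if pairs[j][0] == oi and pairs[j][1] != mi:
--                 return None
--     # Consistent: dict(pairs) keeps first-occurrence key order and (since all
--     # values per key agree) the first value too.
--     return dict(pairs) if pairs else None
-- ===== Notes on version B (the rewrite author's own statement) =====
-- stated objective: alternative
-- what changed: A's single incremental dict with commit-and-compare and early return on conflict is replaced by a dict-free brute-force pairwise consistency check over the collected (old_indent, new_indent) pairs (every pair compared against every later pair), followed by dict(pairs) at the end.
import Mathlib
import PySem

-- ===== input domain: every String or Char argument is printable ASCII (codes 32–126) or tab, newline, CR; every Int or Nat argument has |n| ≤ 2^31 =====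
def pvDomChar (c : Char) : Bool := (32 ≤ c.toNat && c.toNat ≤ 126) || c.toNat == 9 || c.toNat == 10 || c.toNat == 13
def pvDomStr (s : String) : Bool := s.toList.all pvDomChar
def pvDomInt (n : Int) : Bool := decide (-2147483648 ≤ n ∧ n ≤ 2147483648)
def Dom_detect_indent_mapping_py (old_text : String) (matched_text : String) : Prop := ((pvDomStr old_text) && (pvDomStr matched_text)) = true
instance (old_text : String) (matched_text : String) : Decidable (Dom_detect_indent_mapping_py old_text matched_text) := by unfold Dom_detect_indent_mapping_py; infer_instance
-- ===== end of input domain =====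

-- B replaces A's incremental dict with early-return-on-conflict by a dict-free brute-force
-- pairwise consistency check over the collected indent pairs, then dict(pairs) at the end;
-- objective: alternative (B is O(n^2) in the number of matching lines, not faster).

-- ===== PORT A =====

-- line.rstrip('\n\r') ported by hand (PySem.Chars.rstrip strips whitespace, not a char set); exact
def pyRstripNL (s : List Char) : List Char :=
  (s.reverse.dropWhile (fun c => c == '\n' || c == '\r')).reverse

-- _get_line_indent (module helper used by both A and B)
def getLineIndent (line : String) : String :=
  let stripped := PySem.Chars.lstrip line.toList
  if stripped.isEmpty then String.ofList (pyRstripNL line.toList)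
  else String.ofList (PySem.List.slice line.toList none
        (some ((line.toList.length : Int) - (stripped.length : Int))))

-- A's for-loop over zip(old_lines, matched_lines) with early 'return None'
def detectGo : List (String × String) → PySem.Dict String String →
    Option (PySem.Dict String String)
  | [], m => some m
  | (ol, ml) :: rest, m =>
    let oi := getLineIndent ol
    let mi := getLineIndent ml
    if PySem.Str.strip ol = PySem.Str.strip ml then
      match m.get? oi with
      | some v => if v = mi then detectGo rest m else none
      | none => detectGo rest (m.insert oi mi)
    else detectGo rest m

def detect_indent_mapping_py (old_text : String) (matched_text : String) :
    Option (List (String × String)) :=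
  let old_lines := PySem.Str.splitlines old_text
  let matched_lines := PySem.Str.splitlines matched_text
  if old_lines.length ≠ matched_lines.length then none
  else
    match detectGo (old_lines.zip matched_lines) PySem.Dict.empty with
    | none => none
    | some m => if m.items = [] then none else some m.items

-- ===== PORT B =====

-- [(indent(ol), indent(ml)) for ol, ml in zip(...) if ol.strip() == ml.strip()]
def collectPairs (zs : List (String × String)) : List (String × String) :=
  zs.filterMap (fun p =>
    if PySem.Str.strip p.1 = PySem.Str.strip p.2 then
      some (getLineIndent p.1, getLineIndent p.2)
    else none)

-- the nested index loops 'for i … for j in range(i+1, …)': pair i against every later pair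
def conflictExists : List (String × String) → Bool
  | [] => false
  | p :: rest => rest.any (fun q => q.1 == p.1 && q.2 != p.2) || conflictExists rest

def detect_indent_mapping_py_alt (old_text : String) (matched_text : String) :
    Option (List (String × String)) :=
  let old_lines := PySem.Str.splitlines old_text
  let matched_lines := PySem.Str.splitlines matched_text
  if old_lines.length ≠ matched_lines.length then none
  else
    let pairs := collectPairs (old_lines.zip matched_lines)
    if conflictExists pairs then none
    else if pairs = [] then none
    else some (PySem.Dict.ofList pairs).items   -- dict(pairs)

-- ===== PRECONDITION & SPEC =====
def Spec_detect_indent_mapping_py (old_text : String) (matched_text : String) (out : Option (List (String × String))) : Prop := out = detect_indent_mapping_py_alt old_text matched_text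
instance (old_text : String) (matched_text : String) (out : Option (List (String × String))) : Decidable (Spec_detect_indent_mapping_py old_text matched_text out) := by unfold Spec_detect_indent_mapping_py; infer_instance

-- ===== CLAIM (what is proved, stated in full; the proofs are below) =====
def Claim_equal_detect_indent_mapping_py : Prop := ∀ (old_text : String) (matched_text : String), Dom_detect_indent_mapping_py old_text matched_text → Spec_detect_indent_mapping_py old_text matched_text (detect_indent_mapping_py old_text matched_text)

-- ===== LEMMAS AND PROOFS =====

-- proof-only: A's loop restricted to the already-filtered pairs
def detectGo' : List (String × String) → PySem.Dict String String →
    Option (PySem.Dict String String)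
  | [], m => some m
  | (oi, mi) :: rest, m =>
    match m.get? oi with
    | some v => if v = mi then detectGo' rest m else none
    | none => detectGo' rest (m.insert oi mi)

lemma detectGo_eq_filtered (zs : List (String × String)) (m : PySem.Dict String String) :
    detectGo zs m = detectGo' (collectPairs zs) m := by
  induction zs generalizing m with
  | nil => rfl
  | cons z rest ih =>
    obtain ⟨ol, ml⟩ := z
    by_cases h : PySem.Str.strip ol = PySem.Str.strip ml
    · have hcp : collectPairs ((ol, ml) :: rest)
          = (getLineIndent ol, getLineIndent ml) :: collectPairs rest := by
        simp [collectPairs, h]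
      rw [hcp]
      simp only [detectGo, detectGo', if_pos h]
      cases hg : m.get? (getLineIndent ol) with
      | none =>
        show detectGo rest (m.insert (getLineIndent ol) (getLineIndent ml))
          = detectGo' (collectPairs rest) (m.insert (getLineIndent ol) (getLineIndent ml))
        exact ih _
      | some v =>
        show (if v = getLineIndent ml then detectGo rest m else none)
          = (if v = getLineIndent ml then detectGo' (collectPairs rest) m else none)
        by_cases hv : v = getLineIndent ml
        · rw [if_pos hv, if_pos hv]; exact ih m
        · rw [if_neg hv, if_neg hv]
    · have hcp : collectPairs ((ol, ml) :: rest) = collectPairs rest := by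
        simp [collectPairs, h]
      rw [hcp]
      simp only [detectGo, if_neg h]
      exact ih m

-- a conflict of a pair against the accumulated dict
def mconf (m : PySem.Dict String String) (ps : List (String × String)) : Bool :=
  ps.any (fun p => m.getD p.1 p.2 != p.2)

-- inserting the value already stored is the identity (keys unique)
lemma insert_self_of_get? {κ ν : Type} [BEq κ] [LawfulBEq κ]
    (d : PySem.Dict κ ν) (k : κ) (v : ν) (hnd : d.keys.Nodup)
    (h : d.get? k = some v) : d.insert k v = d := by
  have hc : d.contains k = true := by
    rw [PySem.Dict.contains_eq_isSome_get?, h]; rfl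
  apply PySem.Dict.ext
  rw [PySem.Dict.items_insert_of_contains _ _ hc]
  conv_rhs => rw [← List.map_id d.items]
  apply List.map_congr_left
  rintro ⟨p1, p2⟩ hp
  by_cases hk : (p1 == k) = true
  · have hk' : p1 = k := eq_of_beq hk
    have h2 : d.get? p1 = some p2 := PySem.Dict.get?_of_mem_items _ hp hnd
    rw [hk', h] at h2
    simp [hk', Option.some_inj.mp h2]
  · simp [hk]

-- conflicts against the dict after a fresh insert = head's pairwise conflicts + old dict conflicts
lemma mconf_insert (m : PySem.Dict String String) (oi mi : String)
    (hm : m.get? oi = none) (rest : List (String × String)) :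
    mconf (m.insert oi mi) rest
      = (rest.any (fun q => q.1 == oi && q.2 != mi) || mconf m rest) := by
  induction rest with
  | nil => rfl
  | cons r rr ih =>
    simp only [mconf, List.any_cons] at ih ⊢
    rw [PySem.Dict.getD_insert, ih]
    by_cases hq : r.1 = oi
    · have hgd : m.getD r.1 r.2 = r.2 := by
        rw [hq]; exact PySem.Dict.getD_of_get?_eq_none _ _ hm
      rw [if_pos hq, hgd]
      simp only [hq, beq_self_eq_true, Bool.true_and, bne_self_eq_false]
      cases h1 : (mi != r.2)
      · have h2 : (r.2 != mi) = false := by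
          simp at h1; simp [h1]
        simp [h2]
      · have h2 : (r.2 != mi) = true := by
          simp at h1 ⊢; exact fun h => h1 h.symm
        simp [h2]
    · rw [if_neg hq]
      have : (r.1 == oi) = false := by simpa using hq
      rw [this]
      cases m.getD r.1 r.2 != r.2 <;>
        cases rr.any (fun q => q.1 == oi && q.2 != mi) <;>
        cases rr.any (fun p => m.getD p.1 p.2 != p.2) <;> simp

-- A's loop on the filtered pairs = pairwise-conflict test + plain dict build
lemma loop_eq (ps : List (String × String)) :
    ∀ (m : PySem.Dict String String), m.keys.Nodup →
    detectGo' ps m =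
      (if mconf m ps || conflictExists ps then none
       else some (ps.foldl (fun d p => d.insert p.1 p.2) m)) := by
  induction ps with
  | nil => intro m _; simp [detectGo', mconf, conflictExists]
  | cons q rest ih
  =>
    intro m hnd
    obtain ⟨oi, mi⟩ := q
    cases hm : m.get? oi with
    | some v =>
      have hgd : m.getD oi mi = v := PySem.Dict.getD_of_get?_eq_some _ _ hm
      by_cases hv : v = mi
      · -- consistent repeat: insert is a no-op, head conflicts fold into rest's m-conflicts
        have hins : m.insert oi mi = m := insert_self_of_get? m oi mi hnd (hv ▸ hm)
        have hcond : (mconf m ((oi, mi) :: rest) || conflictExists ((oi, mi) :: rest))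
            = (mconf m rest || conflictExists rest) := by
          simp only [mconf, conflictExists, List.any_cons, hgd, hv, bne_self_eq_false,
            Bool.false_or]
          by_cases hha : rest.any (fun q => q.1 == oi && q.2 != mi) = true
          · have hmr : rest.any (fun p => m.getD p.1 p.2 != p.2) = true := by
              obtain ⟨q, hq, hq2⟩ := List.any_eq_true.mp hha
              simp only [Bool.and_eq_true] at hq2
              obtain ⟨h1, h2⟩ := hq2
              refine List.any_eq_true.mpr ⟨q, hq, ?_⟩
              have : m.getD q.1 q.2 = mi := by
                rw [eq_of_beq h1]
                rw [PySem.Dict.getD_of_get?_eq_some _ _ hm, hv]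
              rw [this]
              simpa [bne_comm] using h2
            simp [hha, hmr]
          · simp only [Bool.not_eq_true] at hha
            rw [hha]
            cases rest.any (fun p => m.getD p.1 p.2 != p.2) <;>
              cases conflictExists rest <;> simp
        simp only [detectGo', hm, if_pos hv, List.foldl_cons, hins, hcond]
        exact ih m hnd
      · -- conflict against the dict: A exits; head is an m-conflict
        have hh : mconf m ((oi, mi) :: rest) = true := by
          simp only [mconf, List.any_cons, hgd]
          have : (v != mi) = true := by simpa using hv
          simp [this]
        simp [detectGo', hm, if_neg hv, hh]
    | none =>
      -- fresh key: A inserts; head's pairwise conflicts become conflicts against the new dict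
      have hnd' : (m.insert oi mi).keys.Nodup := PySem.Dict.nodup_keys_insert _ _ _ hnd
      have hgd : m.getD oi mi = mi := PySem.Dict.getD_of_get?_eq_none _ _ hm
      have hcond : (mconf (m.insert oi mi) rest || conflictExists rest)
          = (mconf m ((oi, mi) :: rest) || conflictExists ((oi, mi) :: rest)) := by
        rw [mconf_insert m oi mi hm rest]
        simp only [mconf, conflictExists, List.any_cons, hgd, bne_self_eq_false, Bool.false_or]
        cases rest.any (fun q => q.1 == oi && q.2 != mi) <;>
          cases rest.any (fun p => m.getD p.1 p.2 != p.2) <;>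
          cases conflictExists rest <;> simp
      simp only [detectGo', hm, List.foldl_cons]
      rw [ih _ hnd', hcond]

-- an insert is never empty, so a dict built from a nonempty pair list is nonempty
lemma items_insert_ne_nil {κ ν : Type} [BEq κ] (d : PySem.Dict κ ν) (k : κ) (v : ν) :
    (d.insert k v).items ≠ [] := by
  rw [PySem.Dict.items_insert]
  split
  · rename_i hc
    intro h
    have : d.items = [] := by simpa using h
    rw [PySem.Dict.contains, this] at hc
    simp at hc
  · simp

lemma foldl_insert_ne_nil {κ ν : Type} [BEq κ] (ps : List (κ × ν)) :
    ∀ (d : PySem.Dict κ ν), d.items ≠ [] →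
    (ps.foldl (fun d p => d.insert p.1 p.2) d).items ≠ [] := by
  induction ps with
  | nil => intro d h; simpa using h
  | cons p rest ih =>
    intro d h
    exact ih _ (items_insert_ne_nil d p.1 p.2)

-- ===== VERDICT (by name: the statement is the Claim_ definition above) =====
theorem detect_indent_mapping_py_spec : Claim_equal_detect_indent_mapping_py := by
  intro old_text matched_text _
  unfold Spec_detect_indent_mapping_py detect_indent_mapping_py detect_indent_mapping_py_alt
  by_cases hlen : (PySem.Str.splitlines old_text).length = (PySem.Str.splitlines matched_text).length
  · simp only [hlen, ne_eq, not_true_eq_false, if_false]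
    rw [detectGo_eq_filtered]
    set ps := collectPairs ((PySem.Str.splitlines old_text).zip (PySem.Str.splitlines matched_text)) with hps
    rw [loop_eq ps PySem.Dict.empty (by simp [PySem.Dict.keys]; exact List.nodup_nil)]
    have hmc : mconf PySem.Dict.empty ps = false := by
      simp [mconf, PySem.Dict.getD_empty]
    rw [hmc, Bool.false_or]
    cases hcf : conflictExists ps with
    | true => simp
    | false =>
      simp only [Bool.false_eq_true, if_false]
      by_cases hpe : ps = []
      · rw [hpe]
        rfl
      · have hne : (ps.foldl (fun d p => d.insert p.1 p.2) PySem.Dict.empty).items ≠ [] := by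
          cases hp2 : ps with
          | nil => exact absurd hp2 hpe
          | cons p rest =>
            rw [List.foldl_cons]
            exact foldl_insert_ne_nil rest _ (items_insert_ne_nil _ _ _)
        rw [if_neg hne, if_neg hpe]
        rfl
  · simp [hlen]
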